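-- pv_equiv track=rewrite | github.com/karthik14344/Gomuku | gomoku_ai.py | is_open_threat
-- ===== SOURCE A (Python) =====
-- from typing import List, Optional, Tuple
--
-- State = List[List[Optional[str]]]
--
-- BOARD_SIZE = 15
--
-- def is_open_threat(state: State, row: int, col: int, color: str, min_count: int = 3) -> bool:
--     """
--     Check if placing a stone at (row, col) creates an open threat (min_count in a row with at least one open end).
--     An open threat is dangerous because it can lead to a win.
--     """
--     if state[row][col] is not None:
--         return False
--
--     directions = [(0, 1), (1, 0), (1, 1), (1, -1)]
--
--     for dx, dy in directions:
--         cnt = 1  # Count the stone we're placing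
--         left_open = False
--         right_open = False
--
--         # Count forward and check if end is open
--         r, c = row + dx, col + dy
--         while 0 <= r < BOARD_SIZE and 0 <= c < BOARD_SIZE and state[r][c] == color:
--             cnt += 1
--             r += dx
--             c += dy
--         # Check if forward end is open (empty space)
--         if 0 <= r < BOARD_SIZE and 0 <= c < BOARD_SIZE and state[r][c] is None:
--             right_open = True
--
--         # Count backward and check if end is open
--         r, c = row - dx, col - dy
--         while 0 <= r < BOARD_SIZE and 0 <= c < BOARD_SIZE and state[r][c] == color:
--             cnt += 1
--             r -= dx
--             c -= dy
--         # Check if backward end is open (empty space)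
--         if 0 <= r < BOARD_SIZE and 0 <= c < BOARD_SIZE and state[r][c] is None:
--             left_open = True
--
--         # If we have min_count or more with at least one open end, it's a threat
--         if cnt >= min_count and (left_open or right_open):
--             return True
--
--     return False
-- ===== SOURCE B (Python) =====
-- BOARD_SIZE = 15
--
-- def is_open_threat(state, row, col, color, min_count=3):
--     """Materialized-line version: build the padded marker line for each direction,
--     then expand around the placed stone once."""
--     if state[row][col] is not None:
--         return False
--     for dx, dy in ((0, 1), (1, 0), (1, 1), (1, -1)):
--         # markers for offsets -15..15 along this line; +-15 is always off-board padding
--         line = []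
--         for k in range(-15, 16):
--             r, c = row + dx * k, col + dy * k
--             if 0 <= r < BOARD_SIZE and 0 <= c < BOARD_SIZE:
--                 cell = state[r][c]
--                 line.append('own' if cell == color else ('empty' if cell is None else 'blocked'))
--             else:
--                 line.append('blocked')
--         i = j = 15  # index of the placed stone (counted once)
--         while line[i - 1] == 'own':
--             i -= 1
--         while line[j + 1] == 'own':
--             j += 1
--         if j - i + 1 >= min_count and (line[i - 1] == 'empty' or line[j + 1] == 'empty'):
--             return True
--     return False
-- ===== Notes on version B (the rewrite author's own statement) =====
-- stated objective: alternative
-- what changed: Instead of A's two stateful outward while-loops per direction (mutating r, c, cnt and two open flags), B materializes the padded marker line (own/empty/blocked for offsets -15..15) through the cell and then expands index bounds i,j around the placed stone once, reading the run length and open ends off the line.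
-- outside the precondition, e.g. on is_open_threat([[None, None, None]], -1, 1, 'X', 1): A returns True, B raises IndexError
import Mathlib
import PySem

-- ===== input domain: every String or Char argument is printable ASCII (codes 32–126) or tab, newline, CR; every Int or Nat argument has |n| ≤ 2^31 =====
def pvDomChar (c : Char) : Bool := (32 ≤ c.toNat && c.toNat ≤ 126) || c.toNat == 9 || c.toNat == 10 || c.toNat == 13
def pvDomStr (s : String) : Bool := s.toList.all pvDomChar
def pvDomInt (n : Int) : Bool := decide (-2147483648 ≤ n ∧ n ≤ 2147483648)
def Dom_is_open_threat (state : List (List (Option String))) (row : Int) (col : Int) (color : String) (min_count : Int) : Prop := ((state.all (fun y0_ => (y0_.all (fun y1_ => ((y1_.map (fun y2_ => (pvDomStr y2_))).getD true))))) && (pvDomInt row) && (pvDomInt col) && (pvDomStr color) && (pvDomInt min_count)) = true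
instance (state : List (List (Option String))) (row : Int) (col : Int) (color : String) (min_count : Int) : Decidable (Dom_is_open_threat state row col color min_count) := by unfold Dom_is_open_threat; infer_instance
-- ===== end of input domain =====

-- B rebuilds each direction as a materialized marker line scanned once, instead of A's
-- two stateful outward while-loops; same cost class, different decomposition ("alternative").

-- ===== PORT A =====
-- state[r][c] (Python indexing, negative wraps; none = IndexError)
def pvCell (state : List (List (Option String))) (r c : Int) : Option (Option String) :=
  (PySem.List.pyGet? state r).bind fun rw => PySem.List.pyGet? rw c

-- A's outward while-loop: guard '0<=r<15 and 0<=c<15 and state[r][c]==color'; under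
-- Pre_ the guard goes false within 15 steps, so fuel 15 returns exactly the loop's exit state.
def pvScan (state : List (List (Option String))) (color : String) (dx dy : Int) :
    Nat → Int → Int → Int → Int × Int × Int
  | 0, cnt, r, c => (cnt, r, c)
  | Nat.succ f, cnt, r, c =>
    if (0 ≤ r ∧ r < 15 ∧ 0 ≤ c ∧ c < 15) ∧ pvCell state r c = some (some color)
    then pvScan state color dx dy f (cnt + 1) (r + dx) (c + dy)
    else (cnt, r, c)

-- one iteration of A's direction loop
def pvDirA (state : List (List (Option String))) (row col : Int) (color : String)
    (min_count dx dy : Int) : Bool :=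
  let f := pvScan state color dx dy 15 1 (row + dx) (col + dy)
  let right_open :=
    decide ((0 ≤ f.2.1 ∧ f.2.1 < 15 ∧ 0 ≤ f.2.2 ∧ f.2.2 < 15) ∧ pvCell state f.2.1 f.2.2 = some none)
  let g := pvScan state color (-dx) (-dy) 15 f.1 (row - dx) (col - dy)
  let left_open :=
    decide ((0 ≤ g.2.1 ∧ g.2.1 < 15 ∧ 0 ≤ g.2.2 ∧ g.2.2 < 15) ∧ pvCell state g.2.1 g.2.2 = some none)
  decide (min_count ≤ g.1) && (left_open || right_open)

def is_open_threat (state : List (List (Option String))) (row : Int) (col : Int) (color : String) (min_count : Int) : Bool :=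
  match pvCell state row col with
  | some none =>  -- the cell is empty: try the four directions, returning at the first hit
      pvDirA state row col color min_count 0 1 ||
      pvDirA state row col color min_count 1 0 ||
      pvDirA state row col color min_count 1 1 ||
      pvDirA state row col color min_count 1 (-1)
  | _ => false    -- occupied cell: Python's early 'return False'; none (IndexError) is outside Pre_

-- ===== PORT B =====
-- state[r][c] for B (Python indexing; none = IndexError, unreachable in-board under Pre_)
def pvCellB (state : List (List (Option String))) (r c : Int) : Option (Option String) :=
  (PySem.List.pyGet? state r).bind fun rw => PySem.List.pyGet? rw c

-- marker of the cell at offset k along (dx,dy): "own" / "empty" / "blocked"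
def pvMark (state : List (List (Option String))) (row col : Int) (color : String)
    (dx dy k : Int) : String :=
  let r := row + dx * k
  let c := col + dy * k
  if 0 ≤ r ∧ r < 15 ∧ 0 ≤ c ∧ c < 15 then
    match pvCellB state r c with
    | some (some s) => if s = color then "own" else "blocked"
    | some none => "empty"
    | none => "blocked"  -- unreachable in-board under Pre_ (15×15 board)
  else "blocked"

-- Source B's 'while line[i±1] == "own": i ±= 1'; under Pre_ the guard goes false within
-- 15 steps (the padding markers at offsets ±15 are never "own"), so fuel 15 suffices.
def pvGrow (line : List String) (step : Int) : Nat → Int → Int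
  | 0, i => i
  | Nat.succ f, i =>
    if PySem.List.pyGet? line (i + step) = some "own" then pvGrow line step f (i + step) else i

-- one iteration of Source B's direction loop
def pvDirB (state : List (List (Option String))) (row col : Int) (color : String)
    (min_count dx dy : Int) : Bool :=
  let line := (PySem.List.pyRange (-15) 16 1).map (pvMark state row col color dx dy)
  let i := pvGrow line (-1) 15 15
  let j := pvGrow line 1 15 15
  decide (min_count ≤ j - i + 1) &&
    (decide (PySem.List.pyGet? line (i - 1) = some "empty") ||
     decide (PySem.List.pyGet? line (j + 1) = some "empty"))

def is_open_threat_alt (state : List (List (Option String))) (row : Int) (col : Int) (color : String) (min_count : Int) : Bool :=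
  -- Source B's early 'return False' on an occupied cell; a missing cell (IndexError) is outside Pre_
  if pvCellB state row col = some none then
    pvDirB state row col color min_count 0 1 ||
    pvDirB state row col color min_count 1 0 ||
    pvDirB state row col color min_count 1 1 ||
    pvDirB state row col color min_count 1 (-1)
  else false

-- ===== PRECONDITION & SPEC =====
-- Pre_ admits every input whose target cell state[row][col] exists and is occupied (A returns
-- False at once, touching nothing else) and, when that cell is empty, requires the function's
-- natural domain: a full 15×15 board (A hard-codes BOARD_SIZE = 15) with in-board (row, col).
-- Excluded while A still returns: an empty target cell reached through Python's negative-index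
-- wraparound, or a partial board whose scan happens to stop before running off a list — corners
-- where A's value is an accident of wraparound/boundary geometry (see claim cites); everywhere
-- else outside Pre_ A raises IndexError.
def Pre_is_open_threat (state : List (List (Option String))) (row : Int) (col : Int) (color : String) (min_count : Int) : Prop :=
  ((PySem.List.pyGet? state row).bind fun rl => PySem.List.pyGet? rl col) ≠ none ∧
  (((PySem.List.pyGet? state row).bind fun rl => PySem.List.pyGet? rl col) = some none →
    state.length = 15 ∧ (∀ rw ∈ state, rw.length = 15) ∧ 0 ≤ row ∧ row < 15 ∧ 0 ≤ col ∧ col < 15)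
instance (state : List (List (Option String))) (row : Int) (col : Int) (color : String) (min_count : Int) : Decidable (Pre_is_open_threat state row col color min_count) := by unfold Pre_is_open_threat; infer_instance

def pvWitness_is_open_threat : List (List (Option String)) × Int × Int × String × Int :=
  (List.replicate 15 (List.replicate 15 none), 7, 7, "X", 3)

def Spec_is_open_threat (state : List (List (Option String))) (row : Int) (col : Int) (color : String) (min_count : Int) (out : Bool) : Prop := out = is_open_threat_alt state row col color min_count
instance (state : List (List (Option String))) (row : Int) (col : Int) (color : String) (min_count : Int) (out : Bool) : Decidable (Spec_is_open_threat state row col color min_count out) := by unfold Spec_is_open_threat; infer_instance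

-- ===== CLAIM (what is proved, stated in full; the proofs are below) =====
def Claim_equal_is_open_threat : Prop := ∀ (state : List (List (Option String))) (row : Int) (col : Int) (color : String) (min_count : Int), Dom_is_open_threat state row col color min_count → Pre_is_open_threat state row col color min_count → Spec_is_open_threat state row col color min_count (is_open_threat state row col color min_count)

-- ===== LEMMAS AND PROOFS =====

theorem pvWitness_ok :
    Dom_is_open_threat pvWitness_is_open_threat.1 pvWitness_is_open_threat.2.1
      pvWitness_is_open_threat.2.2.1 pvWitness_is_open_threat.2.2.2.1 pvWitness_is_open_threat.2.2.2.2 ∧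
    Pre_is_open_threat pvWitness_is_open_threat.1 pvWitness_is_open_threat.2.1
      pvWitness_is_open_threat.2.2.1 pvWitness_is_open_threat.2.2.2.1 pvWitness_is_open_threat.2.2.2.2 := by
  decide

-- abstract forms of the two loops, used only by the proofs below:
-- runF/runB walk the marker function itself, forward (k+1) resp. backward (k-1)
def runF (m : Int → String) : Nat → Int → Int
  | 0, k => k
  | Nat.succ f, k => if m k = "own" then runF m f (k + 1) else k

def runB (m : Int → String) : Nat → Int → Int
  | 0, k => k
  | Nat.succ f, k => if m k = "own" then runB m f (k - 1) else k

-- the two cell readers are definitionally the same function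
theorem cellB_eq_cell (state : List (List (Option String))) (r c : Int) :
    pvCellB state r c = pvCell state r c := rfl

-- A's loop guard at offset k is exactly "the marker at offset k is own"
theorem guard_iff (state : List (List (Option String))) (row col : Int) (color : String)
    (dx dy k : Int) :
    ((0 ≤ row + dx * k ∧ row + dx * k < 15 ∧ 0 ≤ col + dy * k ∧ col + dy * k < 15) ∧
      pvCell state (row + dx * k) (col + dy * k) = some (some color)) ↔
    pvMark state row col color dx dy k = "own" := by
  unfold pvMark
  simp only [cellB_eq_cell]
  by_cases hib : 0 ≤ row + dx * k ∧ row + dx * k < 15 ∧ 0 ≤ col + dy * k ∧ col + dy * k < 15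
  · rw [if_pos hib]
    cases hc : pvCell state (row + dx * k) (col + dy * k) with
    | none => simp [hib]
    | some cell =>
      cases cell with
      | none => simp [hib]
      | some s => by_cases hs : s = color <;> simp [hib, hs]
  · rw [if_neg hib]; simp [hib]

-- A's open-end test at offset k is exactly "the marker at offset k is empty"
theorem empty_iff (state : List (List (Option String))) (row col : Int) (color : String)
    (dx dy k : Int) :
    ((0 ≤ row + dx * k ∧ row + dx * k < 15 ∧ 0 ≤ col + dy * k ∧ col + dy * k < 15) ∧
      pvCell state (row + dx * k) (col + dy * k) = some none) ↔
    pvMark state row col color dx dy k = "empty" := by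
  unfold pvMark
  simp only [cellB_eq_cell]
  by_cases hib : 0 ≤ row + dx * k ∧ row + dx * k < 15 ∧ 0 ≤ col + dy * k ∧ col + dy * k < 15
  · rw [if_pos hib]
    cases hc : pvCell state (row + dx * k) (col + dy * k) with
    | none => simp [hib]
    | some cell =>
      cases cell with
      | none => simp [hib]
      | some s => by_cases hs : s = color <;> simp [hib, hs]
  · rw [if_neg hib]; simp [hib]

-- indexing B's 31-marker line at 15 + k reads the marker at offset k
theorem line_get (m : Int → String) (k : Int) (h1 : -15 ≤ k) (h2 : k ≤ 15) :
    PySem.List.pyGet? ((PySem.List.pyRange (-15) 16 1).map m) (15 + k) = some (m k) := by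
  have hlen : (((PySem.List.pyRange (-15) 16 1).map m).length : Int) = 31 := by
    simp [PySem.List.length_pyRange_one]
  rw [PySem.List.pyGet?_eq_some_getElem _ (by omega) (by rw [hlen]; omega)]
  congr 1
  simp only [List.getElem_map, PySem.List.getElem_pyRange_one]
  congr 1
  omega

theorem scan_eq_runF (state : List (List (Option String))) (row col : Int) (color : String)
    (dx dy : Int) :
    ∀ (f : Nat) (k cnt : Int),
      pvScan state color dx dy f cnt (row + dx * k) (col + dy * k) =
        (cnt + (runF (pvMark state row col color dx dy) f k - k),
         row + dx * runF (pvMark state row col color dx dy) f k,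
         col + dy * runF (pvMark state row col color dx dy) f k) := by
  intro f
  induction f with
  | zero => intro k cnt; simp [pvScan, runF]
  | succ f ih =>
    intro k cnt
    rw [pvScan, runF]
    by_cases hm : pvMark state row col color dx dy k = "own"
    · rw [if_pos ((guard_iff state row col color dx dy k).mpr hm), if_pos hm]
      have h1 : row + dx * k + dx = row + dx * (k + 1) := by ring
      have h2 : col + dy * k + dy = col + dy * (k + 1) := by ring
      rw [h1, h2, ih (k + 1) (cnt + 1)]
      refine Prod.ext ?_ rfl
      simp only
      omega
    · rw [if_neg (fun h => hm ((guard_iff state row col color dx dy k).mp h)), if_neg hm]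
      refine Prod.ext ?_ rfl
      simp only
      omega

theorem scan_eq_runB (state : List (List (Option String))) (row col : Int) (color : String)
    (dx dy : Int) :
    ∀ (f : Nat) (k cnt : Int),
      pvScan state color (-dx) (-dy) f cnt (row + dx * k) (col + dy * k) =
        (cnt + (k - runB (pvMark state row col color dx dy) f k),
         row + dx * runB (pvMark state row col color dx dy) f k,
         col + dy * runB (pvMark state row col color dx dy) f k) := by
  intro f
  induction f with
  | zero => intro k cnt; simp [pvScan, runB]
  | succ f ih =>
    intro k cnt
    rw [pvScan, runB]
    by_cases hm : pvMark state row col color dx dy k = "own"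
    · rw [if_pos ((guard_iff state row col color dx dy k).mpr hm), if_pos hm]
      have h1 : row + dx * k + -dx = row + dx * (k - 1) := by ring
      have h2 : col + dy * k + -dy = col + dy * (k - 1) := by ring
      rw [h1, h2, ih (k - 1) (cnt + 1)]
      refine Prod.ext ?_ rfl
      simp only
      omega
    · rw [if_neg (fun h => hm ((guard_iff state row col color dx dy k).mp h)), if_neg hm]
      refine Prod.ext ?_ rfl
      simp only
      omega

theorem runF_bounds (m : Int → String) (hstop : m 15 ≠ "own") :
    ∀ (f : Nat) (k : Int), 1 ≤ k → k ≤ 15 → k ≤ runF m f k ∧ runF m f k ≤ 15 := by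
  intro f
  induction f with
  | zero => intro k h1 h2; simp [runF]; omega
  | succ f ih =>
    intro k h1 h2
    rw [runF]
    by_cases hm : m k = "own"
    · have hk : k ≠ 15 := fun h => hstop (h ▸ hm)
      rw [if_pos hm]
      have := ih (k + 1) (by omega) (by omega)
      omega
    · rw [if_neg hm]; omega

theorem runB_bounds (m : Int → String) (hstop : m (-15) ≠ "own") :
    ∀ (f : Nat) (k : Int), -15 ≤ k → k ≤ -1 → runB m f k ≤ k ∧ -15 ≤ runB m f k := by
  intro f
  induction f with
  | zero => intro k h1 h2; simp [runB]; omega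
  | succ f ih =>
    intro k h1 h2
    rw [runB]
    by_cases hm : m k = "own"
    · have hk : k ≠ -15 := fun h => hstop (h ▸ hm)
      rw [if_pos hm]
      have := ih (k - 1) (by omega) (by omega)
      omega
    · rw [if_neg hm]; omega

-- Source B's j-loop at index k + 14 is runF at offset k
theorem grow_eq_runF (m : Int → String) (hstop : m 15 ≠ "own") :
    ∀ (f : Nat) (k : Int), 1 ≤ k → k ≤ 15 →
      pvGrow ((PySem.List.pyRange (-15) 16 1).map m) 1 f (k + 14) = runF m f k + 14 := by
  intro f
  induction f with
  | zero => intro k h1 h2; simp [pvGrow, runF]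
  | succ f ih =>
    intro k h1 h2
    rw [pvGrow, runF]
    have hidx : k + 14 + 1 = 15 + k := by ring
    rw [hidx, line_get m k (by omega) h2]
    by_cases hm : m k = "own"
    · have hk : k ≠ 15 := fun h => hstop (h ▸ hm)
      rw [if_pos (by rw [hm]), if_pos hm]
      have h3 : 15 + k = (k + 1) + 14 := by ring
      rw [h3, ih (k + 1) (by omega) (by omega)]
    · rw [if_neg (by simp [hm]), if_neg hm]

-- Source B's i-loop at index k + 16 is runB at offset k
theorem grow_eq_runB (m : Int → String) (hstop : m (-15) ≠ "own") :
    ∀ (f : Nat) (k : Int), -15 ≤ k → k ≤ -1 →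
      pvGrow ((PySem.List.pyRange (-15) 16 1).map m) (-1) f (k + 16) = runB m f k + 16 := by
  intro f
  induction f with
  | zero => intro k h1 h2; simp [pvGrow, runB]
  | succ f ih =>
    intro k h1 h2
    rw [pvGrow, runB]
    have hidx : k + 16 + -1 = 15 + k := by ring
    rw [hidx, line_get m k h1 (by omega)]
    by_cases hm : m k = "own"
    · have hk : k ≠ -15 := fun h => hstop (h ▸ hm)
      rw [if_pos (by rw [hm]), if_pos hm]
      have h3 : 15 + k = (k - 1) + 16 := by ring
      rw [h3, ih (k - 1) (by omega) (by omega)]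
    · rw [if_neg (by simp [hm]), if_neg hm]

-- the two direction checks agree for each of the four directions
theorem dir_eq (state : List (List (Option String))) (row col : Int) (color : String)
    (min_count dx dy : Int) (hrow : 0 ≤ row ∧ row < 15) (hcol : 0 ≤ col ∧ col < 15)
    (hd : dx = 1 ∨ (dx = 0 ∧ dy = 1)) :
    pvDirA state row col color min_count dx dy = pvDirB state row col color min_count dx dy := by
  have hstopF : pvMark state row col color dx dy 15 ≠ "own" := by
    unfold pvMark
    rw [if_neg (by rcases hd with h | ⟨h1, h2⟩ <;> subst_vars <;> omega)]
    decide
  have hstopB : pvMark state row col color dx dy (-15) ≠ "own" := by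
    unfold pvMark
    rw [if_neg (by rcases hd with h | ⟨h1, h2⟩ <;> subst_vars <;> omega)]
    decide
  have hJ := runF_bounds (pvMark state row col color dx dy) hstopF 15 1 (by omega) (by omega)
  have hK := runB_bounds (pvMark state row col color dx dy) hstopB 15 (-1) (by omega) (by omega)
  have gF := grow_eq_runF (pvMark state row col color dx dy) hstopF 15 1 (by omega) (by omega)
  have gB := grow_eq_runB (pvMark state row col color dx dy) hstopB 15 (-1) (by omega) (by omega)
  norm_num at gF gB
  set J := runF (pvMark state row col color dx dy) 15 1 with hJdef
  set K := runB (pvMark state row col color dx dy) 15 (-1) with hKdef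
  simp only [pvDirA, pvDirB]
  rw [show row + dx = row + dx * 1 by ring, show col + dy = col + dy * 1 by ring,
      scan_eq_runF state row col color dx dy 15 1 1]
  simp only
  rw [show row - dx = row + dx * (-1) by ring, show col - dy = col + dy * (-1) by ring,
      scan_eq_runB state row col color dx dy 15 (-1) (1 + (J - 1))]
  simp only
  rw [gF, gB]
  rw [decide_eq_decide.mpr (empty_iff state row col color dx dy J),
      decide_eq_decide.mpr (empty_iff state row col color dx dy K)]
  rw [show K + 16 - 1 = 15 + K by ring, show J + 14 + 1 = 15 + J by ring,
      line_get (pvMark state row col color dx dy) K (by omega) (by omega),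
      line_get (pvMark state row col color dx dy) J (by omega) (by omega)]
  simp only [Option.some.injEq]
  congr 1
  exact decide_eq_decide.mpr (by omega)

-- ===== VERDICT (by name: the statement is the Claim_ definition above) =====
theorem is_open_threat_spec : Claim_equal_is_open_threat := by
  intro state row col color min_count _ hpre
  obtain ⟨hne, himp⟩ := hpre
  unfold Spec_is_open_threat is_open_threat is_open_threat_alt
  simp only [cellB_eq_cell]
  by_cases h : pvCell state row col = some none
  · obtain ⟨_, _, hr0, hr1, hc0, hc1⟩ := himp h
    simp only [h, reduceIte]
    rw [dir_eq state row col color min_count 0 1 ⟨hr0, hr1⟩ ⟨hc0, hc1⟩ (Or.inr ⟨rfl, rfl⟩),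
        dir_eq state row col color min_count 1 0 ⟨hr0, hr1⟩ ⟨hc0, hc1⟩ (Or.inl rfl),
        dir_eq state row col color min_count 1 1 ⟨hr0, hr1⟩ ⟨hc0, hc1⟩ (Or.inl rfl),
        dir_eq state row col color min_count 1 (-1) ⟨hr0, hr1⟩ ⟨hc0, hc1⟩ (Or.inl rfl)]
  · rw [if_neg h]
    cases hc : pvCell state row col with
    | none => rfl
    | some cell =>
      cases cell with
      | none => exact absurd hc h
      | some s => rfl
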